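-- pv_equiv track=rewrite | github.com/kAndris2/BankOCR | DataHandler.py | getNumbersFromString
-- ===== SOURCE A (Python) =====
-- MAX_NUM_IN_ACCOUNT = 9
--
-- STEP = 3 #Each number is a 3x3 list.
--
-- def getNumbersFromString(rawData):
--     """
--     - Creates an account number map from the scanned data and returns it as result.
--     """
--     rawData.pop(-1)
--     numbers = []
--
--     for i in range(len(rawData)):
--         start = 0 - STEP #First start position for the first number.
--         end = (STEP - 1) - STEP #First end position for the first number.
--         dataMap = rawData[i].split("\n")
--         dataMap.pop(-1)
--         acc_num = []
--         for n in range(0, MAX_NUM_IN_ACCOUNT):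
--             start += STEP #Sets the next number's position.
--             end += STEP
--             acc_num.append(createNumber(dataMap, start, end))
--         numbers.append(acc_num)
--     return numbers
--
-- def createNumber(data, start, end):
--     """
--     - Returns a list with 3 inner list as rows in the current number map.
--     """
--     number = []
--     temp = ""
--     for row in data:
--         for i,character in enumerate(row):
--             if i >= start and i <= end:
--                 temp += character
--             if i == end:
--                 number.append(list(temp))
--                 temp = ""
--     return number
-- ===== SOURCE B (Python) =====
-- MAX_NUM_IN_ACCOUNT = 9
--
-- STEP = 3
--
-- def getNumbersFromString(rawData):
--     """
--     - Creates an account number map from the scanned data and returns it as result.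
--     - Each account digit is the 3-wide column of 3-char cells cut out of the
--       scanned rows; rows too short to contain a digit's complete cell are skipped.
--     """
--     rawData.pop(-1)
--     numbers = []
--     for block in rawData:
--         rows = block.split("\n")[:-1]
--         numbers.append([[list(row[s:s + STEP]) for row in rows if len(row) >= s + STEP]
--                         for s in range(0, MAX_NUM_IN_ACCOUNT * STEP, STEP)])
--     return numbers
-- ===== Notes on version B (the rewrite author's own statement) =====
-- stated objective: simpler
-- what changed: The helper createNumber's per-character enumerate scan with running start/end counters (and its cross-row temp buffer) is replaced by a nested comprehension that slices the 3-char cell row[s:s+3] at each of the 9 digit offsets, keeping only rows long enough to contain the complete cell; split('\n')[:-1] replaces the pop(-1) on the split result.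
-- intended difference: On blocks containing a ragged scan row (length not a multiple of 3 and shorter than a later row that completes the same digit column) A's leftover temp buffer leaks the ragged row's fragment onto the front of the next completed 3-char cell, while B returns just that complete cell, the intended digit bitmap row. — e.g. on getNumbersFromString(["ab\nxyz\n", ""]): A returns [[[["a", "b", "x", "y", "z"]], [], [], [], [], [], [], [], []]], B returns [[[["x", "y", "z"]], [], [], [], [], [], [], [], []]]
import Mathlib
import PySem

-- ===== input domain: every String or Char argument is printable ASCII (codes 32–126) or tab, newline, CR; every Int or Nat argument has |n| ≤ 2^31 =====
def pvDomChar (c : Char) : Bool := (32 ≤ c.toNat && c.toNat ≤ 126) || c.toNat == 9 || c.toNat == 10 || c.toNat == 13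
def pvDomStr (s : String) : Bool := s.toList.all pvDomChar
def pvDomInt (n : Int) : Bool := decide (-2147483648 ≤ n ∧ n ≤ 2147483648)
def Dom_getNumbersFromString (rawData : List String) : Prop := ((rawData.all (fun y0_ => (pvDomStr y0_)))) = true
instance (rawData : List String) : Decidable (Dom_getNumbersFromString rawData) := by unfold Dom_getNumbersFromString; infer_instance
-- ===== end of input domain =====

-- B replaces A's per-character scan (with its cross-row temp buffer) by direct 3-char
-- cell slices, keeping only rows long enough to contain the complete cell (objective:
-- simpler). Both A and B pop the last element of rawData in place, identically; the
-- equivalence proved here is about the return value.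

-- ===== PORT A =====

-- list(temp): a string turned into the list of its one-character strings
def pvListStr (cs : List Char) : List String := cs.map (fun c => String.ofList [c])

-- body of createNumber's inner 'for i, character in enumerate(row)' loop
def cnChar (start stop : Int) (st : List (List String) × List Char) (ic : Int × Char) :
    List (List String) × List Char :=
  let temp := if ic.1 ≥ start ∧ ic.1 ≤ stop then st.2 ++ [ic.2] else st.2
  if ic.1 = stop then (st.1 ++ [pvListStr temp], []) else (st.1, temp)

-- body of createNumber's outer 'for row in data' loop
def cnRow (start stop : Int) (st : List (List String) × List Char) (row : String) :
    List (List String) × List Char :=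
  (PySem.List.enumerate row.toList 0).foldl (cnChar start stop) st

def createNumber (data : List String) (start stop : Int) : List (List String) :=
  (data.foldl (cnRow start stop) ([], [])).1

-- dataMap.pop(-1); the none branch is unreachable at call sites (split never returns [])
def popLastOrNil {α : Type} (l : List α) : List α :=
  match PySem.List.pop? l (-1) with
  | some p => p.2
  | none => []

-- dataMap = rawData[i].split("\n"); dataMap.pop(-1) — the scan rows of one raw block
def pvRowsOf (block : String) : List String :=
  popLastOrNil ((PySem.Str.split? block "\n").getD [])

-- loop body for one rawData[i]: split, pop, then the 9-step start/end loop
def blockA (row : String) : List (List (List String)) :=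
  let dataMap := pvRowsOf row
  ((PySem.List.pyRange 0 9).foldl
      (fun (st : Int × Int × List (List (List String))) _n =>
        (st.1 + 3, st.2.1 + 3, st.2.2 ++ [createNumber dataMap (st.1 + 3) (st.2.1 + 3)]))
      (0 - 3, (3 - 1) - 3, [])).2.2

def getNumbersFromString (rawData : List String) : List (List (List (List String))) :=
  match PySem.List.pop? rawData (-1) with
  | none => []  -- Python raises IndexError here; excluded by Pre_
  | some (_, rest) =>
    (PySem.List.pyRange 0 (PySem.List.len rest)).foldl
      (fun numbers i => numbers ++ [blockA (PySem.List.pyGetD rest i "")]) []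

-- ===== PORT B =====

-- the inner comprehension '[list(row[s:s+3]) for row in rows if len(row) >= s+3]'
def digitCol (rows : List String) (s : Int) : List (List String) :=
  (rows.filter (fun row => decide (PySem.Str.len row ≥ s + 3))).map
    (fun row => pvListStr (PySem.Str.slice row (some s) (some (s + 3))).toList)

def getNumbersFromString_alt (rawData : List String) : List (List (List (List String))) :=
  match PySem.List.pop? rawData (-1) with
  | none => []  -- Python raises IndexError here; excluded by Pre_
  | some (_, rest) =>
    rest.foldl (fun numbers block =>
      numbers ++ [(PySem.List.pyRange 0 (9 * 3) 3).map
        (digitCol (PySem.List.slice ((PySem.Str.split? block "\n").getD []) none (some (-1))))]) []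

-- ===== PRECONDITION & SPEC =====
-- A raises IndexError on rawData.pop(-1) iff rawData is empty; nothing else raises.
def Pre_getNumbersFromString (rawData : List String) : Prop := rawData ≠ []
instance (rawData : List String) : Decidable (Pre_getNumbersFromString rawData) := by
  unfold Pre_getNumbersFromString; infer_instance

def pvWitness_getNumbersFromString : List String := [""]

-- a ragged row (length not a multiple of 3, inside the 27-wide scan area) followed by a
-- later row long enough to complete the digit column the ragged row ends in
def pvFragFlush : List String → Bool
  | [] => false
  | r :: rs =>
    ((decide (r.length % 3 ≠ 0) && decide (r.length < 27)) &&
      rs.any (fun m => decide (r.length + 3 - r.length % 3 ≤ m.length))) || pvFragFlush rs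

-- On blocks containing a ragged scan row (length not a multiple of 3 and shorter than a
-- later row that completes the same digit column) A's leftover temp buffer leaks the
-- ragged row's fragment onto the front of the next completed 3-char cell, while B
-- returns just that complete cell, the intended digit bitmap row.
def D_getNumbersFromString (rawData : List String) : Prop :=
  (rawData.dropLast.any (fun block => pvFragFlush (pvRowsOf block))) = true
instance (rawData : List String) : Decidable (D_getNumbersFromString rawData) := by
  unfold D_getNumbersFromString; infer_instance

def Spec_getNumbersFromString (rawData : List String) (out : List (List (List (List String)))) : Prop := ¬ D_getNumbersFromString rawData → out = getNumbersFromString_alt rawData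
instance (rawData : List String) (out : List (List (List (List String)))) : Decidable (Spec_getNumbersFromString rawData out) := by unfold Spec_getNumbersFromString; infer_instance

def pvDiffWitness_getNumbersFromString : List String := ["ab\nxyz\n", ""]

def pvDiffWitnessOut_getNumbersFromString :
    (List (List (List (List String)))) × (List (List (List (List String)))) :=
  ([[[["a", "b", "x", "y", "z"]], [], [], [], [], [], [], [], []]],
   [[[["x", "y", "z"]], [], [], [], [], [], [], [], []]])

-- ===== CLAIM (what is proved, stated in full; the proofs are below) =====
def Claim_unchanged_getNumbersFromString : Prop := ∀ (rawData : List String), Dom_getNumbersFromString rawData → Pre_getNumbersFromString rawData → Spec_getNumbersFromString rawData (getNumbersFromString rawData)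
def Claim_changed_getNumbersFromString : Prop := Dom_getNumbersFromString (pvDiffWitness_getNumbersFromString) ∧ Pre_getNumbersFromString (pvDiffWitness_getNumbersFromString) ∧ D_getNumbersFromString (pvDiffWitness_getNumbersFromString) ∧ getNumbersFromString (pvDiffWitness_getNumbersFromString) = pvDiffWitnessOut_getNumbersFromString.1 ∧ getNumbersFromString_alt (pvDiffWitness_getNumbersFromString) = pvDiffWitnessOut_getNumbersFromString.2 ∧ pvDiffWitnessOut_getNumbersFromString.1 ≠ pvDiffWitnessOut_getNumbersFromString.2
def Claim_exact_getNumbersFromString : Prop := ∀ (rawData : List String), Dom_getNumbersFromString rawData → Pre_getNumbersFromString rawData → D_getNumbersFromString rawData → getNumbersFromString rawData ≠ getNumbersFromString_alt rawData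



-- ===== LEMMAS AND PROOFS =====

def pvOffsets : List Nat := [0, 3, 6, 9, 12, 15, 18, 21, 24]

-- a ragged row for the digit column at offset s, followed by a row completing that column
def fragAtS (s : Nat) : List String → Bool
  | [] => false
  | r :: rs =>
    ((decide (s < r.length) && decide (r.length < s + 3)) &&
      rs.any (fun r' => decide (s + 3 ≤ r'.length))) || fragAtS s rs

-- pvFragFlush is exactly "some scan offset has a ragged row followed by a completing row"
lemma fragFlush_iff (rows : List String) :
    pvFragFlush rows = true ↔ ∃ s ∈ pvOffsets, fragAtS s rows = true := by
  induction rows with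
  | nil => simp [pvFragFlush, fragAtS]
  | cons r rs ih =>
    rw [pvFragFlush, Bool.or_eq_true_iff, ih]
    constructor
    · rintro (hl | ⟨s, hs, h⟩)
      · simp only [Bool.and_eq_true_iff, decide_eq_true_eq] at hl
        obtain ⟨⟨h3, h27⟩, hany⟩ := hl
        refine ⟨r.length - r.length % 3, by simp [pvOffsets]; omega, ?_⟩
        rw [fragAtS, Bool.or_eq_true_iff]
        left
        simp only [Bool.and_eq_true_iff, decide_eq_true_eq]
        refine ⟨⟨by omega, by omega⟩, ?_⟩
        have hb : r.length - r.length % 3 + 3 = r.length + 3 - r.length % 3 := by omega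
        rw [hb]
        exact hany
      · exact ⟨s, hs, by rw [fragAtS, Bool.or_eq_true_iff]; right; exact h⟩
    · rintro ⟨s, hs, h⟩
      rw [fragAtS, Bool.or_eq_true_iff] at h
      rcases h with hl | htail
      · left
        simp only [Bool.and_eq_true_iff, decide_eq_true_eq] at hl
        obtain ⟨⟨hsl, hls⟩, hany⟩ := hl
        have hs' : s % 3 = 0 ∧ s ≤ 24 := by
          simp only [pvOffsets, List.mem_cons, List.not_mem_nil, or_false] at hs
          rcases hs with rfl | rfl | rfl | rfl | rfl | rfl | rfl | rfl | rfl <;> omega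
        simp only [Bool.and_eq_true_iff, decide_eq_true_eq]
        refine ⟨⟨by omega, by omega⟩, ?_⟩
        have hb : r.length + 3 - r.length % 3 = s + 3 := by omega
        rw [hb]
        exact hany
      · exact Or.inr ⟨s, hs, htail⟩

-- A's column scan, rewritten as structural recursion on the rows with the temp buffer
def colA (s : Nat) : List String → List Char → List (List String)
  | [], _ => []
  | r :: rs, temp =>
    if s + 3 ≤ r.length then
      pvListStr (temp ++ (r.toList.drop s).take 3) :: colA s rs []
    else colA s rs (temp ++ (r.toList.drop s).take 3)

-- B's column, with the offset as a natural number
def colB (s : Nat) (rows : List String) : List (List String) :=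
  (rows.filter (fun r => decide (s + 3 ≤ r.length))).map
    (fun r => pvListStr ((r.toList.drop s).take 3))

lemma popLastOrNil_eq {α : Type} (l : List α) : popLastOrNil l = l.dropLast := by
  rcases l.eq_nil_or_concat with rfl | ⟨xs, x, rfl⟩
  · rfl
  · simp [popLastOrNil, PySem.List.pop?_last]

lemma pvRowsOf_eq (block : String) :
    pvRowsOf block = ((PySem.Str.split? block "\n").getD []).dropLast :=
  popLastOrNil_eq _

-- once the scan is past the flush index s+2, nothing changes any more
lemma charFold_past (s : Nat) (l : List Char) : ∀ (j : Int) (st : List (List String) × List Char),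
    (s : Int) + 2 < j →
    (PySem.List.enumerate l j).foldl (cnChar (s : Int) ((s : Int) + 2)) st = st := by
  induction l with
  | nil => intro j st _; rfl
  | cons c l ih =>
    intro j st hj
    rw [PySem.List.enumerate_cons, List.foldl_cons]
    have hstep : cnChar (s : Int) ((s : Int) + 2) st (j, c) = st := by
      simp only [cnChar]
      split_ifs <;> first | rfl | omega
    rw [hstep]
    exact ih (j + 1) st (by omega)

-- scanning from an index j in [s, s+2]: collect into temp, flush iff index s+2 is reached
lemma charFold_ge (s : Nat) (l : List Char) : ∀ (j : Nat) (st : List (List String) × List Char),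
    s ≤ j → j ≤ s + 2 →
    (PySem.List.enumerate l (j : Int)).foldl (cnChar (s : Int) ((s : Int) + 2)) st =
      if s + 3 ≤ j + l.length then (st.1 ++ [pvListStr (st.2 ++ l.take (s + 3 - j))], ([] : List Char))
      else (st.1, st.2 ++ l.take (s + 3 - j)) := by
  induction l with
  | nil =>
    intro j st h1 h2
    rw [if_neg (by simp; omega)]
    simp
  | cons c l ih =>
    intro j st h1 h2
    rw [PySem.List.enumerate_cons, List.foldl_cons]
    by_cases hflush : j = s + 2
    · have hstep : cnChar (s : Int) ((s : Int) + 2) st ((j : Int), c)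
          = (st.1 ++ [pvListStr (st.2 ++ [c])], ([] : List Char)) := by
        simp only [cnChar]
        split_ifs <;> first | rfl | omega
      rw [hstep, charFold_past s l ((j : Int) + 1) _ (by omega)]
      rw [if_pos (by simp; omega)]
      have ht : (c :: l).take (s + 3 - j) = [c] := by
        have h3 : s + 3 - j = 1 := by omega
        simp [h3]
      rw [ht]
    · have hstep : cnChar (s : Int) ((s : Int) + 2) st ((j : Int), c)
          = (st.1, st.2 ++ [c]) := by
        simp only [cnChar]
        split_ifs <;> first | rfl | omega
      rw [hstep, show ((j : Int) + 1) = ((j + 1 : Nat) : Int) by push_cast; ring]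
      rw [ih (j + 1) (st.1, st.2 ++ [c]) (by omega) (by omega)]
      have ht : (c :: l).take (s + 3 - j) = c :: l.take (s + 2 - j) := by
        have h3 : s + 3 - j = (s + 2 - j) + 1 := by omega
        simp [h3]
      have he : s + 3 - (j + 1) = s + 2 - j := by omega
      by_cases hc : s + 3 ≤ (j + 1) + l.length
      · rw [if_pos hc, if_pos (by simp; omega), ht, he]
        simp
      · rw [if_neg hc, if_neg (by simp; omega), ht, he]
        simp

-- scanning from an index j ≤ s: temp collects the 3-wide window at s, flush iff the row reaches s+2
lemma charFold_le (s : Nat) (l : List Char) : ∀ (j : Nat) (st : List (List String) × List Char),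
    j ≤ s →
    (PySem.List.enumerate l (j : Int)).foldl (cnChar (s : Int) ((s : Int) + 2)) st =
      if s + 3 ≤ j + l.length then
        (st.1 ++ [pvListStr (st.2 ++ (l.drop (s - j)).take 3)], ([] : List Char))
      else (st.1, st.2 ++ (l.drop (s - j)).take 3) := by
  induction l with
  | nil =>
    intro j st h1
    rw [if_neg (by simp; omega)]
    simp
  | cons c l ih =>
    intro j st h1
    by_cases hj : j = s
    · rw [charFold_ge s (c :: l) j st (by omega) (by omega)]
      have h0 : s - j = 0 := by omega
      have h3 : s + 3 - j = 3 := by omega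
      rw [h0, h3, List.drop_zero]
    · rw [PySem.List.enumerate_cons, List.foldl_cons]
      have hstep : cnChar (s : Int) ((s : Int) + 2) st ((j : Int), c) = st := by
        simp only [cnChar]
        split_ifs <;> first | rfl | omega
      rw [hstep, show ((j : Int) + 1) = ((j + 1 : Nat) : Int) by push_cast; ring]
      rw [ih (j + 1) st (by omega)]
      have hd : (c :: l).drop (s - j) = l.drop (s - (j + 1)) := by
        have h3 : s - j = (s - (j + 1)) + 1 := by omega
        simp [h3]
      by_cases hc : s + 3 ≤ (j + 1) + l.length
      · rw [if_pos hc, if_pos (by simp; omega), hd]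
      · rw [if_neg hc, if_neg (by simp; omega), hd]

-- one row of A's character scan, as a step on the (cells, temp) state
lemma cnRow_eq (s : Nat) (st : List (List String) × List Char) (row : String) :
    cnRow (s : Int) ((s : Int) + 2) st row =
      if s + 3 ≤ row.length then
        (st.1 ++ [pvListStr (st.2 ++ (row.toList.drop s).take 3)], ([] : List Char))
      else (st.1, st.2 ++ (row.toList.drop s).take 3) := by
  simp only [cnRow]
  have h := charFold_le s row.toList 0 st (Nat.zero_le s)
  rw [Nat.cast_zero] at h
  rw [h]
  simp only [Nat.zero_add, Nat.sub_zero, String.length_toList]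

-- A's row fold computes colA
lemma foldl_colA (s : Nat) (rows : List String) :
    ∀ (out : List (List String)) (temp : List Char),
      (rows.foldl (cnRow (s : Int) ((s : Int) + 2)) (out, temp)).1 = out ++ colA s rows temp := by
  induction rows with
  | nil => intro out temp; simp [colA]
  | cons r rs ih =>
    intro out temp
    rw [List.foldl_cons, cnRow_eq]
    by_cases hlen : s + 3 ≤ r.length
    · rw [if_pos hlen]
      rw [ih (out ++ [pvListStr (temp ++ (r.toList.drop s).take 3)]) []]
      simp [colA, hlen]
    · rw [if_neg hlen]
      rw [ih out (temp ++ (r.toList.drop s).take 3)]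
      simp [colA, hlen]

set_option maxHeartbeats 1000000 in
lemma createNumber_eq (s : Nat) (dm : List String) :
    createNumber dm (s : Int) ((s : Int) + 2) = colA s dm [] := by
  unfold createNumber
  rw [foldl_colA s dm [] []]
  exact List.nil_append _

-- A's 9-step start/end loop over one block equals the map over the 9 offsets
lemma blockA_eq (row : String) :
    blockA row = pvOffsets.map (fun s => colA s (pvRowsOf row) []) := by
  unfold blockA
  rw [show PySem.List.pyRange 0 9 = [0, 1, 2, 3, 4, 5, 6, 7, 8] from by decide]
  generalize pvRowsOf row = dm
  simp only [List.foldl_cons, List.foldl_nil, pvOffsets, List.map_cons, List.map_nil,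
    List.nil_append, List.cons_append]
  simp only [List.cons.injEq, and_true]
  refine ⟨?_, ?_, ?_, ?_, ?_, ?_, ?_, ?_, ?_⟩
  · have h := createNumber_eq 0 dm; norm_num at h ⊢; exact h
  · have h := createNumber_eq 3 dm; norm_num at h ⊢; exact h
  · have h := createNumber_eq 6 dm; norm_num at h ⊢; exact h
  · have h := createNumber_eq 9 dm; norm_num at h ⊢; exact h
  · have h := createNumber_eq 12 dm; norm_num at h ⊢; exact h
  · have h := createNumber_eq 15 dm; norm_num at h ⊢; exact h
  · have h := createNumber_eq 18 dm; norm_num at h ⊢; exact h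
  · have h := createNumber_eq 21 dm; norm_num at h ⊢; exact h
  · have h := createNumber_eq 24 dm; norm_num at h ⊢; exact h

-- B's comprehension with a natural offset is colB
lemma digitCol_natCast (s : Nat) (rows : List String) :
    digitCol rows (s : Int) = colB s rows := by
  unfold digitCol colB
  have hp : (fun row => decide (PySem.Str.len row ≥ (s : Int) + 3))
      = (fun r : String => decide (s + 3 ≤ r.length)) := by
    funext r
    rw [decide_eq_decide, PySem.Str.len_eq]
    have hb : r.toList.length = r.length := String.length_toList
    omega
  rw [hp]
  apply List.map_congr_left
  intro r _
  congr 1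
  rw [PySem.Str.toList_slice]
  show PySem.List.slice r.toList (some (s : Int)) (some ((s : Int) + 3)) = _
  rw [show ((s : Int) + 3) = (((s + 3 : Nat)) : Int) by push_cast; ring,
    PySem.List.slice_natCast]
  congr 1
  omega

-- B's map over the 9 slice offsets, with natural offsets
lemma mapDigitCol_eq (rows : List String) :
    (PySem.List.pyRange 0 (9 * 3) 3).map (digitCol rows)
      = pvOffsets.map (fun s => colB s rows) := by
  rw [show PySem.List.pyRange 0 (9 * 3) 3 = [0, 3, 6, 9, 12, 15, 18, 21, 24] from by decide]
  simp only [pvOffsets, List.map_cons, List.map_nil, List.cons.injEq, and_true]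
  refine ⟨?_, ?_, ?_, ?_, ?_, ?_, ?_, ?_, ?_⟩
  · exact_mod_cast digitCol_natCast 0 rows
  · exact_mod_cast digitCol_natCast 3 rows
  · exact_mod_cast digitCol_natCast 6 rows
  · exact_mod_cast digitCol_natCast 9 rows
  · exact_mod_cast digitCol_natCast 12 rows
  · exact_mod_cast digitCol_natCast 15 rows
  · exact_mod_cast digitCol_natCast 18 rows
  · exact_mod_cast digitCol_natCast 21 rows
  · exact_mod_cast digitCol_natCast 24 rows

lemma foldl_append_map {α β : Type} (f : α → β) (l : List α) :
    ∀ (init : List β), l.foldl (fun acc x => acc ++ [f x]) init = init ++ l.map f := by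
  induction l with
  | nil => intro init; simp
  | cons x xs ih => intro init; rw [List.foldl_cons, ih]; simp

lemma A_norm (rawData : List String) (h : rawData ≠ []) :
    getNumbersFromString rawData
      = rawData.dropLast.map (fun b => pvOffsets.map (fun s => colA s (pvRowsOf b) [])) := by
  rcases rawData.eq_nil_or_concat with rfl | ⟨xs, x, rfl⟩
  · exact absurd rfl h
  · rw [List.concat_eq_append]
    unfold getNumbersFromString
    rw [PySem.List.pop?_last]
    calc (PySem.List.pyRange 0 (PySem.List.len xs)).foldl
          (fun numbers i => numbers ++ [blockA (PySem.List.pyGetD xs i "")]) []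
        = xs.foldl (fun numbers row => numbers ++ [blockA row]) [] :=
          PySem.List.foldl_pyRange_zero_pyGetD xs ""
            (fun numbers row => numbers ++ [blockA row]) []
      _ = xs.map blockA := foldl_append_map blockA xs []
      _ = (xs ++ [x]).dropLast.map (fun b => pvOffsets.map (fun s => colA s (pvRowsOf b) [])) := by
          rw [List.dropLast_concat]
          exact List.map_congr_left (fun b _ => blockA_eq b)

lemma B_norm (rawData : List String) (h : rawData ≠ []) :
    getNumbersFromString_alt rawData
      = rawData.dropLast.map (fun b => pvOffsets.map (fun s => colB s (pvRowsOf b))) := by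
  rcases rawData.eq_nil_or_concat with rfl | ⟨xs, x, rfl⟩
  · exact absurd rfl h
  · rw [List.concat_eq_append]
    unfold getNumbersFromString_alt
    rw [PySem.List.pop?_last]
    refine (foldl_append_map
      (fun block => (PySem.List.pyRange 0 (9 * 3) 3).map
        (digitCol (PySem.List.slice ((PySem.Str.split? block "\n").getD []) none (some (-1))))) xs []).trans ?_
    rw [List.nil_append, List.dropLast_concat]
    apply List.map_congr_left
    intro b _
    rw [PySem.List.slice_to_neg_one, ← pvRowsOf_eq]
    exact mapDigitCol_eq _

-- colB on a row that flushes / does not flush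
lemma colB_cons_pos {s : Nat} {r : String} (rs : List String) (hlen : s + 3 ≤ r.length) :
    colB s (r :: rs) = pvListStr ((r.toList.drop s).take 3) :: colB s rs := by
  simp [colB, hlen]

lemma colB_cons_neg {s : Nat} {r : String} (rs : List String) (hlen : ¬ s + 3 ≤ r.length) :
    colB s (r :: rs) = colB s rs := by
  simp [colB, hlen]

-- without a ragged row followed by a completing row, the temp buffer never reaches a flush
lemma colU (s : Nat) (rows : List String) :
    ∀ (temp : List Char),
      (temp ≠ [] → ∀ r ∈ rows, r.length < s + 3) →
      fragAtS s rows = false →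
      colA s rows temp = colB s rows := by
  induction rows with
  | nil => intro temp _ _; rfl
  | cons r rs ih =>
    intro temp htemp hff
    rw [fragAtS, Bool.or_eq_false_iff] at hff
    obtain ⟨h1, h2⟩ := hff
    by_cases hlen : s + 3 ≤ r.length
    · have ht : temp = [] := by
        by_contra hne
        exact absurd hlen (by have := htemp hne r (List.mem_cons_self); omega)
      subst ht
      rw [colB_cons_pos rs hlen]
      simp only [colA, if_pos hlen, List.nil_append]
      rw [ih [] (fun hc => absurd rfl hc) h2]
    · simp only [colA, if_neg hlen]
      rw [colB_cons_neg rs hlen]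
      apply ih _ _ h2
      intro hne r' hr'
      by_cases hfrag : s < r.length
      · have hany : rs.any (fun r' => decide (s + 3 ≤ r'.length)) = false := by
          have hl3 : r.length < s + 3 := by omega
          simpa [hfrag, hl3] using h1
        rw [List.any_eq_false] at hany
        have := hany r' hr'
        simp at this
        omega
      · have hcell : (r.toList.drop s).take 3 = [] := by
          have hd : r.toList.drop s = [] :=
            List.drop_eq_nil_of_le (by rw [String.length_toList]; omega)
          simp [hd]
        rw [hcell, List.append_nil] at hne
        exact htemp hne r' (List.mem_cons_of_mem r hr')

lemma length_pvListStr (cs : List Char) : (pvListStr cs).length = cs.length := by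
  simp [pvListStr]

-- a pending fragment that meets a later flush makes the columns differ
lemma colM (s : Nat) (rows : List String) :
    ∀ (temp : List Char),
      ((temp ≠ [] ∧ rows.any (fun r => decide (s + 3 ≤ r.length)) = true)
        ∨ fragAtS s rows = true) →
      colA s rows temp ≠ colB s rows := by
  induction rows with
  | nil => intro temp h; simp [fragAtS] at h
  | cons r rs ih =>
    intro temp h
    by_cases hlen : s + 3 ≤ r.length
    · by_cases ht : temp = []
      · subst ht
        have hff : fragAtS s rs = true := by
          rcases h with ⟨hne, _⟩ | hff
          · exact absurd rfl hne
          · rw [fragAtS, Bool.or_eq_true_iff] at hff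
            rcases hff with hl | hr
            · exfalso
              obtain ⟨hfrag, _⟩ := Bool.and_eq_true_iff.mp hl
              obtain ⟨_, hl2⟩ := Bool.and_eq_true_iff.mp hfrag
              have : r.length < s + 3 := of_decide_eq_true hl2
              omega
            · exact hr
        intro heq
        rw [colB_cons_pos rs hlen] at heq
        simp only [colA, if_pos hlen, List.nil_append] at heq
        exact ih [] (Or.inr hff) (List.cons_eq_cons.mp heq).2
      · intro heq
        rw [colB_cons_pos rs hlen] at heq
        simp only [colA, if_pos hlen] at heq
        have hhead := (List.cons_eq_cons.mp heq).1
        have hl := congrArg List.length hhead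
        rw [length_pvListStr, length_pvListStr, List.length_append] at hl
        have : temp.length = 0 := by omega
        exact ht (List.eq_nil_of_length_eq_zero this)
    · simp only [colA, if_neg hlen]
      rw [colB_cons_neg rs hlen]
      apply ih
      rcases h with ⟨hne, hany⟩ | hff
      · left
        refine ⟨fun hc => hne (List.append_eq_nil_iff.mp hc).1, ?_⟩
        rw [List.any_cons, Bool.or_eq_true_iff] at hany
        rcases hany with h' | h'
        · exact absurd (of_decide_eq_true h') hlen
        · exact h'
      · rw [fragAtS, Bool.or_eq_true_iff] at hff
        rcases hff with hl | hr
        · obtain ⟨hf, hany⟩ := Bool.and_eq_true_iff.mp hl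
          obtain ⟨hf1, _⟩ := Bool.and_eq_true_iff.mp hf
          have hs : s < r.length := of_decide_eq_true hf1
          left
          refine ⟨?_, hany⟩
          intro hc
          have := congrArg List.length hc
          rw [List.length_append, List.length_take, List.length_drop,
            String.length_toList] at this
          simp at this
          omega
        · exact Or.inr hr

lemma map_ne_of_mem {α β : Type} (f g : α → β) {l : List α} {x : α}
    (hx : x ∈ l) (h : f x ≠ g x) : l.map f ≠ l.map g := by
  induction l with
  | nil => cases hx
  | cons a l ih =>
    intro heq
    rw [List.map_cons, List.map_cons] at heq
    obtain ⟨h1, h2⟩ := List.cons_eq_cons.mp heq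
    rcases List.mem_cons.mp hx with rfl | hx'
    · exact h h1
    · exact ih hx' h2

-- ===== VERDICT (by name: the statement is the Claim_ definition above) =====
theorem getNumbersFromString_spec : Claim_unchanged_getNumbersFromString := by
  intro rawData _ hpre
  unfold Spec_getNumbersFromString
  intro hD
  rw [A_norm rawData hpre, B_norm rawData hpre]
  apply List.map_congr_left
  intro b hb
  apply List.map_congr_left
  intro s hs
  apply colU
  · intro hc; exact absurd rfl hc
  · unfold D_getNumbersFromString at hD
    rw [Bool.not_eq_true, List.any_eq_false] at hD
    have h1 := hD b hb
    rw [Bool.not_eq_true] at h1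
    cases hcase : fragAtS s (pvRowsOf b)
    · rfl
    · exact absurd ((fragFlush_iff (pvRowsOf b)).mpr ⟨s, hs, hcase⟩) (by rw [h1]; simp)

theorem getNumbersFromString_changed : Claim_changed_getNumbersFromString := by
  unfold Claim_changed_getNumbersFromString; decide

theorem getNumbersFromString_tight : Claim_exact_getNumbersFromString := by
  intro rawData _ hpre hD
  rw [A_norm rawData hpre, B_norm rawData hpre]
  unfold D_getNumbersFromString at hD
  rw [List.any_eq_true] at hD
  obtain ⟨b, hb, hbs⟩ := hD
  obtain ⟨s, hs, hff⟩ := (fragFlush_iff (pvRowsOf b)).mp hbs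
  exact map_ne_of_mem _ _ hb (map_ne_of_mem _ _ hs (colM s (pvRowsOf b) [] (Or.inr hff)))
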